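-- pv_equiv track=rewrite | github.com/mbilgaye/12.11.2025- | 2..py | until_stop
-- ===== SOURCE A (Python) =====
-- def until_stop(words):
--     result = []
--     index = 0
--
--     while index < len(words):
--         if words[index] == "STOP":
--             break
--         result.append(words[index])
--         index += 1
--     return result
-- ===== SOURCE B (Python) =====
-- def until_stop(words):
--     i = words.index("STOP") if "STOP" in words else len(words)
--     return list(words[:i])
-- ===== Notes on version B (the rewrite author's own statement) =====
-- stated objective: idiomatic
-- what changed: B locates the sentinel position with index()/len() and returns a single slice, replacing A's fused element-by-element while loop with per-element append.
import Mathlib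
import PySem

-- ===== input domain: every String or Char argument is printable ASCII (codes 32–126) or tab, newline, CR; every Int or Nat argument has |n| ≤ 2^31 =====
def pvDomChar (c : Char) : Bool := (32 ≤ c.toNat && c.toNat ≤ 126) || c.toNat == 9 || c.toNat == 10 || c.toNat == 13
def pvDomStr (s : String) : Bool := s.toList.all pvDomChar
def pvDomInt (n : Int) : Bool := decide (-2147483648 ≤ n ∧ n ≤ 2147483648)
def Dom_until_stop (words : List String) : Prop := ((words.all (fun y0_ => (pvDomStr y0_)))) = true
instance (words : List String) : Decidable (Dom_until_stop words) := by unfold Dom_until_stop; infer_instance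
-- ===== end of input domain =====

-- B replaces A's fused element-by-element while loop with a sentinel search (index/len) followed by one slice; objective: idiomatic.

-- ===== PORT A =====
-- the while loop: index advances while in range and words[index] ≠ "STOP", appending to result
def untilStopLoop (words : List String) (index : Nat) (result : List String) : List String :=
  if h : index < words.length then
    if words[index] = "STOP" then result
    else untilStopLoop words (index + 1) (result ++ [words[index]])
  else result
termination_by words.length - index

def until_stop (words : List String) : List String :=
  untilStopLoop words 0 []

-- ===== PORT B =====
def until_stop_alt (words : List String) : List String :=
  let i : Int := match PySem.List.index? words "STOP" with
    | some k => (k : Int)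
    | none => (words.length : Int)
  PySem.List.slice words none (some i)

-- ===== PRECONDITION & SPEC =====
def Spec_until_stop (words : List String) (out : List String) : Prop := out = until_stop_alt words
instance (words : List String) (out : List String) : Decidable (Spec_until_stop words out) := by unfold Spec_until_stop; infer_instance

-- ===== CLAIM (what is proved, stated in full; the proofs are below) =====
def Claim_equal_until_stop : Prop := ∀ (words : List String), Dom_until_stop words → Spec_until_stop words (until_stop words)

-- ===== LEMMAS AND PROOFS =====

theorem untilStopLoop_eq (words : List String) (index : Nat) (result : List String) :
    untilStopLoop words index result
      = result ++ (words.drop index).takeWhile (fun w => !decide (w = "STOP")) := by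
  rw [untilStopLoop]
  split
  · next h =>
    have hd : words.drop index = words[index] :: words.drop (index + 1) :=
      List.drop_eq_getElem_cons h
    split
    · next he => simp [hd, he]
    · next he =>
      rw [untilStopLoop_eq, hd]
      simp [List.takeWhile, he]
  · next h =>
    have : words.drop index = [] := List.drop_eq_nil_of_le (by omega)
    simp [this]
termination_by words.length - index

theorem takeWhile_all_ne (ws : List String) (h : "STOP" ∉ ws) :
    ws.takeWhile (fun w => !decide (w = "STOP")) = ws := by
  induction ws with
  | nil => rfl
  | cons x xs ih =>
    simp only [List.mem_cons, not_or] at h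
    simp [Ne.symm h.1, ih h.2]

theorem takeWhile_pre (pre suf : List String) (h : "STOP" ∉ pre) :
    (pre ++ "STOP" :: suf).takeWhile (fun w => !decide (w = "STOP")) = pre := by
  induction pre with
  | nil => simp [List.takeWhile]
  | cons x xs ih =>
    simp only [List.mem_cons, not_or] at h
    simp [Ne.symm h.1, ih h.2]

-- ===== VERDICT (by name: the statement is the Claim_ definition above) =====
theorem until_stop_spec : Claim_equal_until_stop := by
  intro words _
  show until_stop words = until_stop_alt words
  rw [until_stop, untilStopLoop_eq]
  unfold until_stop_alt
  cases hidx : PySem.List.index? words "STOP" with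
  | none =>
    have hnm : "STOP" ∉ words := (PySem.List.index?_eq_none_iff _ _).mp hidx
    simp [PySem.List.slice_to_natCast, takeWhile_all_ne words hnm]
  | some k =>
    obtain ⟨pre, suf, hws, hlen, hnm⟩ := (PySem.List.index?_eq_some_iff _ _ _).mp hidx
    subst hws
    simp [PySem.List.slice_to_natCast, takeWhile_pre pre suf hnm, ← hlen,
      List.take_append_of_le_length (le_refl _)]
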